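-- pv_equiv track=rewrite | github.com/0xmariowu/Autosearch | autosearch/cli/mcp_config_writers.py | _find_top_object_close
-- ===== SOURCE A (Python) =====
-- def _find_top_object_close(text: str) -> int | None:
--     """Return the index of the `}` that closes the top-level JSON object, or
--     None if the brace structure is broken. Aware of strings + JSONC comments."""
--     depth = 0
--     in_string = False
--     escape = False
--     in_line_comment = False
--     in_block_comment = False
--     i = 0
--     while i < len(text):
--         ch = text[i]
--         nxt = text[i + 1] if i + 1 < len(text) else ""
--         if escape:
--             escape = False
--             i += 1
--             continue
--         if in_line_comment:
--             if ch == "\n":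
--                 in_line_comment = False
--             i += 1
--             continue
--         if in_block_comment:
--             if ch == "*" and nxt == "/":
--                 in_block_comment = False
--                 i += 2
--                 continue
--             i += 1
--             continue
--         if in_string:
--             if ch == "\\":
--                 escape = True
--             elif ch == '"':
--                 in_string = False
--             i += 1
--             continue
--         if ch == "/" and nxt == "/":
--             in_line_comment = True
--             i += 2
--             continue
--         if ch == "/" and nxt == "*":
--             in_block_comment = True
--             i += 2
--             continue
--         if ch == '"':
--             in_string = True
--         elif ch == "{":
--             depth += 1
--         elif ch == "}":
--             depth -= 1
--             if depth == 0:
--                 return i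
--         i += 1
--     return None
-- ===== SOURCE B (Python) =====
-- def _find_top_object_close(text: str) -> int | None:
--     """Token-jumping rewrite: skip whole string/comment tokens instead of
--     tracking boolean scanner flags char-by-char."""
--     depth = 0
--     n = len(text)
--     i = 0
--     while i < n:
--         ch = text[i]
--         if ch == '"':
--             j = i + 1
--             while j < n:
--                 if text[j] == "\\":
--                     j += 2
--                 elif text[j] == '"':
--                     j += 1
--                     break
--                 else:
--                     j += 1
--             i = j
--         elif ch == "/" and i + 1 < n and text[i + 1] == "/":
--             nl = text.find("\n", i + 2)
--             i = n if nl == -1 else nl + 1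
--         elif ch == "/" and i + 1 < n and text[i + 1] == "*":
--             end = text.find("*/", i + 2)
--             i = n if end == -1 else end + 2
--         elif ch == "{":
--             depth += 1
--             i += 1
--         elif ch == "}":
--             depth -= 1
--             if depth == 0:
--                 return i
--             i += 1
--         else:
--             i += 1
--     return None
-- ===== Notes on version B (the rewrite author's own statement) =====
-- stated objective: alternative
-- what changed: A scans char-by-char carrying four boolean scanner flags (in_string/escape/line-comment/block-comment); B has no state flags and instead jumps over whole string and comment tokens at once (inner skip loop / str.find), counting brace depth only in the neutral state.
import Mathlib
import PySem

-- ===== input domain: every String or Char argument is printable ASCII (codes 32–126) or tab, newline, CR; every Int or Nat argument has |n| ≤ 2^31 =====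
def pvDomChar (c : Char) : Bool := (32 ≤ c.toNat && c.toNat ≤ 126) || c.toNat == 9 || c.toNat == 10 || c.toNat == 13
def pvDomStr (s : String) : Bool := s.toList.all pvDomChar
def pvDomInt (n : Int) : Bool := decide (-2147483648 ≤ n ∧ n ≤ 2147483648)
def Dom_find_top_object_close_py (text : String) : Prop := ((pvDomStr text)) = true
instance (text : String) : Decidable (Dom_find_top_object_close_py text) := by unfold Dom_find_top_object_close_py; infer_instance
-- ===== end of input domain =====

-- B replaces A's char-by-char boolean-flag scanner by a token-jumping scan that skips
-- whole string/comment tokens at once (objective: alternative; same O(n) cost).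

-- ===== PORT A =====
-- A's while-loop as recursion on the remaining characters; `rest.head?` is Python's
-- `text[i+1]` peek (none where Python uses ""); the four state flags and `i` are carried.
def goA : List Char → Int → Bool → Bool → Bool → Bool → Nat → Option Int
  | [], _, _, _, _, _, _ => none
  | ch :: rest, depth, instr, esc, inl, inb, i =>
    if esc then goA rest depth instr false inl inb (i+1)
    else if inl then
      goA rest depth instr esc (if ch = '\n' then false else true) inb (i+1)
    else if inb then
      if ch = '*' ∧ rest.head? = some '/' then goA rest.tail depth instr esc inl false (i+2)
      else goA rest depth instr esc inl inb (i+1)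
    else if instr then
      if ch = '\\' then goA rest depth instr true inl inb (i+1)
      else if ch = '"' then goA rest depth false esc inl inb (i+1)
      else goA rest depth instr esc inl inb (i+1)
    else if ch = '/' ∧ rest.head? = some '/' then goA rest.tail depth instr esc true inb (i+2)
    else if ch = '/' ∧ rest.head? = some '*' then goA rest.tail depth instr esc inl true (i+2)
    else if ch = '"' then goA rest depth true esc inl inb (i+1)
    else if ch = '{' then goA rest (depth+1) instr esc inl inb (i+1)
    else if ch = '}' then
      if depth - 1 = 0 then some (i : Int) else goA rest (depth-1) instr esc inl inb (i+1)
    else goA rest depth instr esc inl inb (i+1)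
  termination_by cs _ _ _ _ _ _ => cs.length
  decreasing_by all_goals simp [List.length_tail]

def find_top_object_close_py (text : String) : Option Int :=
  goA text.toList 0 false false false false 0

-- ===== PORT B =====
-- B's inner string loop: consume up to and including the closing quote
-- (a backslash eats the next char; an unterminated string runs to the end).
def skipStr : List Char → Nat → List Char × Nat
  | [], i => ([], i)
  | c :: rest, i =>
    if c = '\\' then skipStr rest.tail (i+2)
    else if c = '"' then (rest, i+1)
    else skipStr rest (i+1)
  termination_by cs _ => cs.length
  decreasing_by all_goals simp [List.length_tail]

-- B's `text.find("\n", i+2)` jump: consume through the newline (or to the end).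
def skipLine : List Char → Nat → List Char × Nat
  | [], i => ([], i)
  | c :: rest, i => if c = '\n' then (rest, i+1) else skipLine rest (i+1)

-- B's `text.find("*/", i+2)` jump: consume through "*/" (or to the end).
def skipBlock : List Char → Nat → List Char × Nat
  | [], i => ([], i)
  | c :: rest, i =>
    if c = '*' ∧ rest.head? = some '/' then (rest.tail, i+2)
    else skipBlock rest (i+1)

theorem skipStr_len : ∀ (n : Nat) (cs : List Char), cs.length ≤ n → ∀ i : Nat,
    (skipStr cs i).1.length ≤ cs.length := by
  intro n
  induction n with
  | zero =>
    intro cs h i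
    have : cs = [] := List.eq_nil_of_length_eq_zero (Nat.le_zero.mp h)
    subst this; simp [skipStr]
  | succ n ih =>
    intro cs h i
    cases cs with
    | nil => simp [skipStr]
    | cons c rest =>
      simp only [skipStr]
      split
      · have h1 : rest.tail.length ≤ n := by simp at h ⊢; omega
        have := ih rest.tail h1 (i+2)
        simp [List.length_tail] at *; omega
      · split
        · simp
        · have h1 : rest.length ≤ n := by simp at h; omega
          have := ih rest h1 (i+1)
          simp at *; omega

theorem skipLine_len : ∀ (cs : List Char) (i : Nat), (skipLine cs i).1.length ≤ cs.length := by
  intro cs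
  induction cs with
  | nil => simp [skipLine]
  | cons c rest ih =>
    intro i
    simp only [skipLine]
    split
    · simp
    · have := ih (i+1); simp at *; omega

theorem skipBlock_len : ∀ (cs : List Char) (i : Nat), (skipBlock cs i).1.length ≤ cs.length := by
  intro cs
  induction cs with
  | nil => simp [skipBlock]
  | cons c rest ih =>
    intro i
    simp only [skipBlock]
    split
    · simp [List.length_tail]; omega
    · have := ih (i+1); simp at *; omega

-- B's outer while-loop: depth counting over whole-token jumps.
def goB : List Char → Int → Nat → Option Int
  | [], _, _ => none
  | c :: rest, depth, i =>
    if c = '"' then goB (skipStr rest (i+1)).1 depth (skipStr rest (i+1)).2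
    else if c = '/' ∧ rest.head? = some '/' then
      goB (skipLine rest.tail (i+2)).1 depth (skipLine rest.tail (i+2)).2
    else if c = '/' ∧ rest.head? = some '*' then
      goB (skipBlock rest.tail (i+2)).1 depth (skipBlock rest.tail (i+2)).2
    else if c = '{' then goB rest (depth+1) (i+1)
    else if c = '}' then
      if depth - 1 = 0 then some (i : Int) else goB rest (depth-1) (i+1)
    else goB rest depth (i+1)
  termination_by cs _ _ => cs.length
  decreasing_by
    · have := skipStr_len rest.length rest le_rfl (i+1); simp; omega
    · have h := skipLine_len rest.tail (i+2)
      have : rest.tail.length ≤ rest.length := by simp [List.length_tail]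
      simp; omega
    · have h := skipBlock_len rest.tail (i+2)
      have : rest.tail.length ≤ rest.length := by simp [List.length_tail]
      simp; omega
    all_goals simp

def find_top_object_close_py_alt (text : String) : Option Int :=
  goB text.toList 0 0

-- ===== PRECONDITION & SPEC =====
def Spec_find_top_object_close_py (text : String) (out : Option Int) : Prop := out = find_top_object_close_py_alt text
instance (text : String) (out : Option Int) : Decidable (Spec_find_top_object_close_py text out) := by unfold Spec_find_top_object_close_py; infer_instance

-- ===== CLAIM (what is proved, stated in full; the proofs are below) =====
def Claim_equal_find_top_object_close_py : Prop := ∀ (text : String), Dom_find_top_object_close_py text → Spec_find_top_object_close_py text (find_top_object_close_py text)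

-- ===== LEMMAS AND PROOFS =====

-- A in string state behaves as: skip the string token, then continue in the neutral state.
theorem goA_string : ∀ (n : Nat) (cs : List Char), cs.length ≤ n → ∀ (d : Int) (i : Nat),
    goA cs d true false false false i =
      goA (skipStr cs i).1 d false false false false (skipStr cs i).2 := by
  intro n
  induction n with
  | zero =>
    intro cs h d i
    have : cs = [] := List.eq_nil_of_length_eq_zero (Nat.le_zero.mp h)
    subst this; simp [goA, skipStr]
  | succ n ih =>
    intro cs h d i
    cases cs with
    | nil => simp [goA, skipStr]
    | cons c rest =>
      by_cases hb : c = '\\'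
      · subst hb
        cases rest with
        | nil => simp [goA, skipStr]
        | cons c2 r2 =>
          have h2 : r2.length ≤ n := by simp at h; omega
          have lhs : goA ('\\' :: c2 :: r2) d true false false false i
              = goA r2 d true false false false (i+2) := by
            simp [goA]
          have rhs : skipStr ('\\' :: c2 :: r2) i = skipStr r2 (i+2) := by
            simp [skipStr]
          rw [lhs, rhs]
          exact ih r2 h2 d (i+2)
      · by_cases hq : c = '"'
        · subst hq; simp [goA, skipStr]
        · have h1 : rest.length ≤ n := by simp at h; omega
          simp only [goA, skipStr, if_neg hb, if_neg hq]
          simpa [hb, hq] using ih rest h1 d (i+1)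

-- A in line-comment state behaves as: skip to past the newline, then continue neutrally.
theorem goA_line : ∀ (cs : List Char) (d : Int) (i : Nat),
    goA cs d false false true false i =
      goA (skipLine cs i).1 d false false false false (skipLine cs i).2 := by
  intro cs
  induction cs with
  | nil => simp [goA, skipLine]
  | cons c rest ih =>
    intro d i
    by_cases hn : c = '\n'
    · subst hn; simp [goA, skipLine]
    · simp only [goA, skipLine, if_neg hn]
      simpa [hn] using ih d (i+1)

-- A in block-comment state behaves as: skip past "*/", then continue neutrally.
theorem goA_block : ∀ (cs : List Char) (d : Int) (i : Nat),
    goA cs d false false false true i =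
      goA (skipBlock cs i).1 d false false false false (skipBlock cs i).2 := by
  intro cs
  induction cs with
  | nil => simp [goA, skipBlock]
  | cons c rest ih =>
    intro d i
    by_cases hs : c = '*' ∧ rest.head? = some '/'
    · simp [goA, skipBlock, hs]
    · simp only [goA, skipBlock, if_neg hs]
      simpa [hs] using ih d (i+1)

-- Main invariant: in the neutral state the two scanners agree.
theorem goA_eq_goB : ∀ (n : Nat) (cs : List Char), cs.length ≤ n → ∀ (d : Int) (i : Nat),
    goA cs d false false false false i = goB cs d i := by
  intro n
  induction n with
  | zero =>
    intro cs h d i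
    have : cs = [] := List.eq_nil_of_length_eq_zero (Nat.le_zero.mp h)
    subst this; simp [goA, goB]
  | succ n ih =>
    intro cs h d i
    cases cs with
    | nil => simp [goA, goB]
    | cons c rest =>
      have h1 : rest.length ≤ n := by simp at h; omega
      have htl : rest.tail.length ≤ n := le_trans (by simp [List.length_tail]) h1
      by_cases hll : c = '/' ∧ rest.head? = some '/'
      · have hq : ¬ c = '"' := by simp [hll.1]
        simp only [goA, goB, if_pos hll, if_neg hq]
        rw [goA_line]
        exact ih _ (le_trans (skipLine_len rest.tail (i+2)) htl) d _
      · by_cases hlb : c = '/' ∧ rest.head? = some '*'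
        · have hq : ¬ c = '"' := by simp [hlb.1]
          simp only [goA, goB, if_neg hll, if_pos hlb, if_neg hq]
          rw [goA_block]
          exact ih _ (le_trans (skipBlock_len rest.tail (i+2)) htl) d _
        · by_cases hq : c = '"'
          · subst hq
            simp only [goA, goB, if_neg hll, if_neg hlb]
            rw [goA_string rest.length rest le_rfl]
            exact ih _ (le_trans (skipStr_len rest.length rest le_rfl (i+1)) h1) d _
          · by_cases ho : c = '{'
            · subst ho
              simp only [goA, goB]
              simp only [if_neg hll, if_neg hlb]
              simpa using ih rest h1 (d+1) (i+1)
            · by_cases hc : c = '}'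
              · subst hc
                simp only [goA, goB]
                simp only [if_neg hll, if_neg hlb]
                by_cases hd : d - 1 = 0
                · simp [hd]
                · simpa [hd] using ih rest h1 (d-1) (i+1)
              · simp only [goA, goB, if_neg hll, if_neg hlb, if_neg hq, if_neg ho, if_neg hc]
                simpa [hq, ho, hc] using ih rest h1 d (i+1)

-- ===== VERDICT (by name: the statement is the Claim_ definition above) =====
theorem find_top_object_close_py_spec : Claim_equal_find_top_object_close_py := by
  intro text _
  unfold Spec_find_top_object_close_py find_top_object_close_py find_top_object_close_py_alt
  exact goA_eq_goB text.toList.length _ le_rfl 0 0
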